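-- pv_equiv track=rewrite | github.com/alpako/ilp-termination | sage/misc_matrix.py | lmatrix_from_diagonal_lblocks
-- ===== SOURCE A (Python) =====
-- def lmatrix_from_diagonal_lblocks(lblocks,zero_elem):
--     def combine_blocks(block1, block2):
--         # print "b1:",block1
--         # print "b2:",block2
--         rows1=len(block1)
--         cols1=len(block1[0])
--         rows2=len(block2)
--         cols2=len(block2[0])
--         lmatrix=[]
--         for i in range(0,rows1+rows2):
--             row=[]
--             for j in range(0,cols1+cols2):
--                 # print i,j
--                 if i < rows1 and j < cols1:
--                     row.append(block1[i][j])
--                 elif i >= rows1 and j >= cols1: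
--                     row.append(block2[i-rows1][j-cols1])
--                 else:
--                     row.append(zero_elem)
--             lmatrix.append(row)
--         return lmatrix
--     # print lblocks
--     mx=lblocks[0]
--     for i in range(1,len(lblocks)):
--         mx=combine_blocks(mx,lblocks[i])
--     return mx
-- ===== SOURCE B (Python) =====
-- def lmatrix_from_diagonal_lblocks(lblocks, zero_elem):
--     if len(lblocks) == 1:
--         return lblocks[0]
--     ncols = [len(b[0]) for b in lblocks]
--     total = sum(ncols)
--     out = []
--     off = 0
--     for b, c in zip(lblocks, ncols):
--         for row in b:
--             out.append([zero_elem] * off + [row[j] for j in range(c)] + [zero_elem] * (total - off - c))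
--         off += c
--     return out
-- ===== Notes on version B (the rewrite author's own statement) =====
-- stated objective: faster
-- what changed: Instead of repeatedly combining the accumulated matrix with the next block (rebuilding the whole matrix for every block), B computes the column widths once and emits each output row directly as left-padding + the row's first width entries + right-padding in a single pass over the blocks, with a trivial fast path returning a single block unchanged.
import Mathlib
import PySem

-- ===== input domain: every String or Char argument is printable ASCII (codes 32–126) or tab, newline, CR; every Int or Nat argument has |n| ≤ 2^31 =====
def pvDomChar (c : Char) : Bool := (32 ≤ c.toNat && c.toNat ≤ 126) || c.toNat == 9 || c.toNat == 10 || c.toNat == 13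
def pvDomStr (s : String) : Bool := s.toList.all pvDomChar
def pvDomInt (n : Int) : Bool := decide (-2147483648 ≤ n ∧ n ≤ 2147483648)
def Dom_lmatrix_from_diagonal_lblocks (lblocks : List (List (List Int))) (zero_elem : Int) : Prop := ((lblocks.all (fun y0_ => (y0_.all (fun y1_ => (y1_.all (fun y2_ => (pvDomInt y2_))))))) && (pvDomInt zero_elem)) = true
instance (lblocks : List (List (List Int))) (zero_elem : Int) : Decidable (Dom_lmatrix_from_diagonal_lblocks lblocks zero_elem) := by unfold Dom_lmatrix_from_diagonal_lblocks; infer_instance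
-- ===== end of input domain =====

-- B replaces A's repeated pairwise combine (rebuilding the whole matrix once per block) by
-- one direct pass emitting each row as left-padding ++ the row's first `width` entries ++
-- right-padding, with a fast path returning a single block unchanged (faster).

-- ===== PORT A =====
-- combine_blocks: the nested for loops become foldl over List.range appending one element
-- per step; block[i][j] is ported with getD (exact under Pre_: all indices are in range).
def pvCombine (zero_elem : Int) (block1 block2 : List (List Int)) : List (List Int) :=
  let rows1 := block1.length
  let cols1 := (block1.headD []).length
  let rows2 := block2.length
  let cols2 := (block2.headD []).length
  (List.range (rows1 + rows2)).foldl (fun lmatrix i =>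
    lmatrix ++ [(List.range (cols1 + cols2)).foldl (fun row j =>
      row ++ [if i < rows1 ∧ j < cols1 then (block1.getD i []).getD j 0
              else if rows1 ≤ i ∧ cols1 ≤ j then (block2.getD (i - rows1) []).getD (j - cols1) 0
              else zero_elem]) []]) []

-- mx = lblocks[0]; for i in range(1,len(lblocks)): mx = combine_blocks(mx, lblocks[i])
-- (lblocks[0] ported with headD; exact under Pre_: lblocks ≠ []).
def lmatrix_from_diagonal_lblocks (lblocks : List (List (List Int))) (zero_elem : Int) : List (List Int) :=
  lblocks.tail.foldl (pvCombine zero_elem) (lblocks.headD [])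

-- ===== PORT B =====
-- the inner loops of Source B: emit the rows of the remaining (block, width) pairs at offset off
-- ([row[j] for j in range(c)] ported with getD; exact under Pre_: j < c ≤ len(row))
def pvAltRows (zero_elem : Int) (total : Nat) : List (List (List Int) × Nat) → Nat → List (List Int)
  | [], _ => []
  | (b, c) :: rest, off =>
      b.map (fun row => List.replicate off zero_elem
          ++ (List.range c).map (fun j => row.getD j 0)
          ++ List.replicate (total - off - c) zero_elem)
        ++ pvAltRows zero_elem total rest (off + c)

-- the single-block fast path ports lblocks[0] as headD (exact: length = 1 means nonempty)
def lmatrix_from_diagonal_lblocks_alt (lblocks : List (List (List Int))) (zero_elem : Int) : List (List Int) :=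
  if lblocks.length = 1 then lblocks.headD []
  else
    let ncols := lblocks.map (fun b => (b.headD []).length)
    let total := ncols.sum
    pvAltRows zero_elem total (lblocks.zip ncols) 0

-- ===== PRECONDITION & SPEC =====
-- Pre_ is exactly the set of inputs where A returns: a nonempty list, and — when there are
-- two or more blocks — every block nonempty with every row at least as long as the block's
-- first row (otherwise combine_blocks raises IndexError reading block[0] or block[i][j]).
def Pre_lmatrix_from_diagonal_lblocks (lblocks : List (List (List Int))) (zero_elem : Int) : Prop :=
  lblocks ≠ [] ∧
    (lblocks.length = 1 ∨ ∀ b ∈ lblocks, b ≠ [] ∧ ∀ r ∈ b, (b.headD []).length ≤ r.length)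
instance (lblocks : List (List (List Int))) (zero_elem : Int) : Decidable (Pre_lmatrix_from_diagonal_lblocks lblocks zero_elem) := by unfold Pre_lmatrix_from_diagonal_lblocks; infer_instance

def pvWitness_lmatrix_from_diagonal_lblocks : List (List (List Int)) × Int :=
  ([[[1, 2], [3, 4]], [[5]]], 0)

def Spec_lmatrix_from_diagonal_lblocks (lblocks : List (List (List Int))) (zero_elem : Int) (out : List (List Int)) : Prop := out = lmatrix_from_diagonal_lblocks_alt lblocks zero_elem
instance (lblocks : List (List (List Int))) (zero_elem : Int) (out : List (List Int)) : Decidable (Spec_lmatrix_from_diagonal_lblocks lblocks zero_elem out) := by unfold Spec_lmatrix_from_diagonal_lblocks; infer_instance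

-- ===== CLAIM (what is proved, stated in full; the proofs are below) =====
def Claim_equal_lmatrix_from_diagonal_lblocks : Prop := ∀ (lblocks : List (List (List Int))) (zero_elem : Int), Dom_lmatrix_from_diagonal_lblocks lblocks zero_elem → Pre_lmatrix_from_diagonal_lblocks lblocks zero_elem → Spec_lmatrix_from_diagonal_lblocks lblocks zero_elem (lmatrix_from_diagonal_lblocks lblocks zero_elem)

-- ===== LEMMAS AND PROOFS =====

-- width of a block, as Source B computes it
def pvW (b : List (List Int)) : Nat := (b.headD []).length

-- a foldl that appends one element per step is a map
theorem pv_foldl_push {α β : Type} (f : α → β) (l : List α) (init : List β) :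
    l.foldl (fun acc x => acc ++ [f x]) init = init ++ l.map f := by
  induction l generalizing init with
  | nil => simp
  | cons a t ih => simp [List.foldl_cons, ih, List.append_assoc]

-- split a map over range (n + m)
theorem pv_map_range_add {β : Type} (f : Nat → β) (n m : Nat) :
    (List.range (n + m)).map f = (List.range n).map f ++ (List.range m).map (fun i => f (n + i)) := by
  rw [List.range_add, List.map_append, List.map_map]
  rfl

-- mapping f ∘ getD over the index range is mapping f over the list
theorem pv_map_getD_range {α β : Type} (f : α → β) (d : α) (l : List α) :
    (List.range l.length).map (fun i => f (l.getD i d)) = l.map f := by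
  induction l with
  | nil => simp
  | cons a t ih =>
    simp only [List.length_cons, List.range_succ_eq_map, List.map_cons, List.map_map]
    simp only [List.getD_cons_zero, Function.comp_def, List.getD_cons_succ]
    exact congrArg (f a :: ·) ih

-- mapping getD over an in-range prefix of indices is a take
theorem pv_map_getD_range_take {α : Type} (d : α) (l : List α) (n : Nat) (h : n ≤ l.length) :
    (List.range n).map (fun i => l.getD i d) = l.take n := by
  induction l generalizing n with
  | nil => simp_all
  | cons a t ih =>
    cases n with
    | zero => simp
    | succ m =>
      simp only [List.range_succ_eq_map, List.map_cons, List.map_map, List.getD_cons_zero,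
        Function.comp_def, List.getD_cons_succ, List.take_succ_cons]
      exact congrArg (a :: ·) (ih m (by simpa using h))

-- take-form of pvAltRows, used to state the loop invariant
def pvAltRowsT (zero_elem : Int) (total : Nat) : List (List (List Int) × Nat) → Nat → List (List Int)
  | [], _ => []
  | (b, c) :: rest, off =>
      b.map (fun row => List.replicate off zero_elem ++ row.take c ++ List.replicate (total - off - c) zero_elem)
        ++ pvAltRowsT zero_elem total rest (off + c)

-- a constant map over a range is a replicate
theorem pv_map_range_const {β : Type} (z : β) (n : Nat) :
    (List.range n).map (fun _ => z) = List.replicate n z := by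
  simp [List.map_const']

-- pvAltRows agrees with its take-form when every row reaches its pair's width
theorem pv_altRows_take (z : Int) (total : Nat) :
    ∀ (pairs : List (List (List Int) × Nat)) (off : Nat),
      (∀ p ∈ pairs, ∀ r ∈ p.1, p.2 ≤ r.length) →
      pvAltRows z total pairs off = pvAltRowsT z total pairs off := by
  intro pairs
  induction pairs with
  | nil => intro off _; rfl
  | cons p rest ih =>
    intro off h
    obtain ⟨b, c⟩ := p
    unfold pvAltRows pvAltRowsT
    rw [ih (off + c) (fun p hp => h p (by simp [hp]))]
    congr 1
    apply List.map_congr_left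
    intro r hr
    rw [pv_map_getD_range_take 0 r c (h (b, c) (by simp) r hr)]

-- characterisation of combine_blocks when every row reaches its block's width
theorem pv_combine_eq (z : Int) (M B : List (List Int)) (c cB : Nat)
    (hMc : (M.headD []).length = c)
    (hBc : (B.headD []).length = cB)
    (hMr : ∀ r ∈ M, c ≤ r.length)
    (hBr : ∀ r ∈ B, cB ≤ r.length) :
    pvCombine z M B
      = M.map (fun r => r.take c ++ List.replicate cB z)
        ++ B.map (fun r => List.replicate c z ++ r.take cB) := by
  subst hMc
  subst hBc
  unfold pvCombine
  simp only [pv_foldl_push, List.nil_append]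
  rw [pv_map_range_add]
  congr 1
  · -- top rows: i < M.length
    rw [← pv_map_getD_range (fun r => r.take (M.headD []).length ++ List.replicate (B.headD []).length z) [] M]
    apply List.map_congr_left
    intro i hi
    rw [List.mem_range] at hi
    rw [pv_map_range_add]
    have hrow : (M.headD []).length ≤ (M.getD i []).length := by
      rw [List.getD_eq_getElem M [] hi]; exact hMr _ (List.getElem_mem hi)
    congr 1
    · rw [List.map_congr_left (g := fun j => (M.getD i []).getD j 0)
        (by intro j hj; rw [List.mem_range] at hj
            rw [if_pos ⟨hi, hj⟩])]
      rw [pv_map_getD_range_take 0 _ _ hrow]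
    · rw [List.map_congr_left (g := fun _ => z)
        (by intro j hj; rw [List.mem_range] at hj
            rw [if_neg (show ¬(i < M.length ∧ (M.headD []).length + j < (M.headD []).length) by omega),
                if_neg (show ¬(M.length ≤ i ∧ (M.headD []).length ≤ (M.headD []).length + j) by omega)])]
      rw [pv_map_range_const]
  · -- bottom rows: i = M.length + i'
    rw [← pv_map_getD_range (fun r => List.replicate (M.headD []).length z ++ r.take (B.headD []).length) [] B]
    apply List.map_congr_left
    intro i hi
    rw [List.mem_range] at hi
    rw [pv_map_range_add]
    congr 1
    · rw [List.map_congr_left (g := fun _ => z)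
        (by intro j hj; rw [List.mem_range] at hj
            rw [if_neg (show ¬(M.length + i < M.length ∧ j < (M.headD []).length) by omega),
                if_neg (show ¬(M.length ≤ M.length + i ∧ (M.headD []).length ≤ j) by omega)])]
      rw [pv_map_range_const]
    · rw [List.map_congr_left (g := fun j => (B.getD i []).getD j 0)
        (by intro j hj; rw [List.mem_range] at hj
            rw [if_neg (show ¬(M.length + i < M.length ∧ (M.headD []).length + j < (M.headD []).length) by omega),
                if_pos ⟨by omega, by omega⟩]
            simp)]
      have hrow : (B.headD []).length ≤ (B.getD i []).length := by
        rw [List.getD_eq_getElem B [] hi]; exact hBr _ (List.getElem_mem hi)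
      rw [pv_map_getD_range_take 0 _ _ hrow]

-- the fold of combine over the remaining blocks, characterised as B's direct construction
theorem pv_fold_eq (z : Int) (rest : List (List (List Int))) :
    ∀ (acc : List (List Int)) (c : Nat),
      acc ≠ [] → (acc.headD []).length = c → (∀ r ∈ acc, r.length = c) →
      (∀ b ∈ rest, b ≠ [] ∧ ∀ r ∈ b, (b.headD []).length ≤ r.length) →
      rest.foldl (pvCombine z) acc
        = acc.map (fun r => r ++ List.replicate (rest.map pvW).sum z)
          ++ pvAltRowsT z (c + (rest.map pvW).sum) (rest.zip (rest.map pvW)) c := by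
  induction rest with
  | nil =>
    intro acc c _ _ _ _
    simp [pvAltRowsT]
  | cons b rest ih =>
    intro acc c hne hhead hrows hrect
    obtain ⟨hbne, hbr⟩ := hrect b (by simp)
    have hcomb : pvCombine z acc b
        = acc.map (fun r => r ++ List.replicate (pvW b) z)
          ++ b.map (fun r => List.replicate c z ++ r.take (pvW b)) := by
      rw [pv_combine_eq z acc b c (pvW b) hhead rfl (fun r hr => le_of_eq (hrows r hr).symm) hbr]
      congr 1
      apply List.map_congr_left
      intro r hr
      rw [← hrows r hr, List.take_length]
    obtain ⟨a0, acct, rfl⟩ : ∃ a0 acct, acc = a0 :: acct := by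
      cases acc with
      | nil => exact absurd rfl hne
      | cons a0 t => exact ⟨a0, t, rfl⟩
    have ha0 : a0.length = c := hrows a0 (by simp)
    have hstep := ih (pvCombine z (a0 :: acct) b) (c + pvW b)
      (by rw [hcomb]; simp)
      (by rw [hcomb]; simp [ha0])
      (by
        rw [hcomb]
        intro r hr
        rcases List.mem_append.mp hr with h | h
        · obtain ⟨r0, hr0, rfl⟩ := List.mem_map.mp h
          simp [hrows r0 hr0]
        · obtain ⟨r0, hr0, rfl⟩ := List.mem_map.mp h
          have := hbr r0 hr0
          simp [pvW] at this ⊢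
          omega)
      (fun b' hb' => hrect b' (by simp [hb']))
    have htot : c + pvW b + (List.map pvW rest).sum - c - pvW b = (List.map pvW rest).sum := by
      omega
    have htot2 : c + (pvW b + (List.map pvW rest).sum) = c + pvW b + (List.map pvW rest).sum := by
      omega
    rw [List.foldl_cons, hstep, hcomb]
    simp only [List.map_cons, List.sum_cons, List.zip_cons_cons, pvAltRowsT, htot, htot2,
      List.map_append, List.map_map, Function.comp_def, List.append_assoc, List.replicate_add]

theorem lmatrix_from_diagonal_lblocks_spec : Claim_equal_lmatrix_from_diagonal_lblocks := by
  intro lblocks zero_elem _ hPre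
  obtain ⟨hne, hPre⟩ := hPre
  unfold Spec_lmatrix_from_diagonal_lblocks lmatrix_from_diagonal_lblocks_alt
  cases lblocks with
  | nil => exact absurd rfl hne
  | cons b0 rest =>
    rcases hPre with hlen | hrect
    · -- single block: A returns it unchanged, and so does B's fast path
      obtain rfl : rest = [] := by
        have : rest.length = 0 := by simpa using hlen
        exact List.eq_nil_of_length_eq_zero this
      simp [lmatrix_from_diagonal_lblocks]
    · obtain ⟨hb0ne, hb0r⟩ := hrect b0 (by simp)
      cases rest with
      | nil =>
        simp [lmatrix_from_diagonal_lblocks]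
      | cons b1 rest2 =>
        obtain ⟨hb1ne, hb1r⟩ := hrect b1 (by simp)
        have hA : lmatrix_from_diagonal_lblocks (b0 :: b1 :: rest2) zero_elem
            = rest2.foldl (pvCombine zero_elem) (pvCombine zero_elem b0 b1) := by
          simp [lmatrix_from_diagonal_lblocks]
        have hcomb : pvCombine zero_elem b0 b1
            = b0.map (fun r => r.take (pvW b0) ++ List.replicate (pvW b1) zero_elem)
              ++ b1.map (fun r => List.replicate (pvW b0) zero_elem ++ r.take (pvW b1)) :=
          pv_combine_eq zero_elem b0 b1 (pvW b0) (pvW b1) rfl rfl hb0r hb1r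
        obtain ⟨r0, b0t, rfl⟩ : ∃ r0 b0t, b0 = r0 :: b0t := by
          cases b0 with
          | nil => exact absurd rfl hb0ne
          | cons r0 t => exact ⟨r0, t, rfl⟩
        have hfold := pv_fold_eq zero_elem rest2 (pvCombine zero_elem (r0 :: b0t) b1)
          (pvW (r0 :: b0t) + pvW b1)
          (by rw [hcomb]; simp)
          (by
            rw [hcomb]
            have : pvW (r0 :: b0t) ≤ r0.length := hb0r r0 (by simp)
            simp [pvW] at this ⊢
            try omega)
          (by
            rw [hcomb]
            intro r hr
            rcases List.mem_append.mp hr with h | h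
            · obtain ⟨rr, hrr, rfl⟩ := List.mem_map.mp h
              have := hb0r rr hrr
              simp [pvW] at this ⊢
              omega
            · obtain ⟨rr, hrr, rfl⟩ := List.mem_map.mp h
              have := hb1r rr hrr
              simp [pvW] at this ⊢
              omega)
          (fun b hb => hrect b (by simp [hb]))
        rw [hA, hfold, hcomb]
        have hlen2 : ¬ ((r0 :: b0t) :: b1 :: rest2).length = 1 := by simp
        rw [if_neg hlen2,
            show (fun (b : List (List Int)) => (b.headD []).length) = pvW from rfl,
            pv_altRows_take zero_elem _ _ 0 (by
              intro p hp
              obtain ⟨hp1, hp2⟩ := List.of_mem_zip hp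
              obtain ⟨bb, hbb, hbbw⟩ := List.mem_map.mp hp2
              intro r hr
              -- p ∈ zip l (l.map pvW) means p = (x, pvW x) for some x ∈ l
              have hzip : ∀ (l : List (List (List Int))),
                  l.zip (l.map pvW) = l.map (fun x => (x, pvW x)) := by
                intro l; induction l with
                | nil => rfl
                | cons x t iht => simp [iht]
              rw [hzip] at hp
              obtain ⟨x, hx, rfl⟩ := List.mem_map.mp hp
              exact (hrect x hx).2 r hr)]
        have ht1 : pvW (r0 :: b0t) + pvW b1 + (rest2.map pvW).sum - 0 - pvW (r0 :: b0t)
            = pvW b1 + (rest2.map pvW).sum := by omega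
        have ht2 : pvW (r0 :: b0t) + pvW b1 + (rest2.map pvW).sum - pvW (r0 :: b0t) - pvW b1
            = (rest2.map pvW).sum := by omega
        have ht3 : pvW (r0 :: b0t) + (pvW b1 + (rest2.map pvW).sum)
            = pvW (r0 :: b0t) + pvW b1 + (rest2.map pvW).sum := by omega
        simp only [List.map_cons, List.sum_cons, List.zip_cons_cons, pvAltRowsT, ht3, ht1, ht2,
          List.map_append, List.map_map, Function.comp_def, List.append_assoc,
          List.replicate_add, List.replicate_zero, List.nil_append, Nat.zero_add]
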